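-- pv_equiv track=rewrite | github.com/b72u68/seedlab | Secret-Key Encryption/task01/cryptanalysis.py | count_doubled
-- ===== SOURCE A (Python) =====
-- def count_doubled(words) -> dict:
--     d = {}
--
--     for w in words:
--         for i in range(len(w)-1):
--             if w[i] == w[i+1]:
--                 d.setdefault(w[i], 0)
--                 d[w[i]] += 1
--
--     return d
-- ===== SOURCE B (Python) =====
-- def count_doubled(words) -> dict:
--     # Run-length scan: each maximal run of r equal characters contributes r-1,
--     # added in one step, instead of testing every adjacent index pair.
--     d = {}
--     for w in words:
--         cs = list(w)
--         while cs:
--             c = cs[0]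
--             r = 1
--             while r < len(cs) and cs[r] == c:
--                 r += 1
--             if r > 1:
--                 d[c] = d.get(c, 0) + (r - 1)
--             cs = cs[r:]
--     return d
-- ===== Notes on version B (the rewrite author's own statement) =====
-- stated objective: alternative
-- what changed: B replaces A's per-index comparison of every adjacent pair with a run-length scan that finds each maximal run of equal characters and adds its contribution (run length - 1) to the dictionary in a single update.
import Mathlib
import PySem

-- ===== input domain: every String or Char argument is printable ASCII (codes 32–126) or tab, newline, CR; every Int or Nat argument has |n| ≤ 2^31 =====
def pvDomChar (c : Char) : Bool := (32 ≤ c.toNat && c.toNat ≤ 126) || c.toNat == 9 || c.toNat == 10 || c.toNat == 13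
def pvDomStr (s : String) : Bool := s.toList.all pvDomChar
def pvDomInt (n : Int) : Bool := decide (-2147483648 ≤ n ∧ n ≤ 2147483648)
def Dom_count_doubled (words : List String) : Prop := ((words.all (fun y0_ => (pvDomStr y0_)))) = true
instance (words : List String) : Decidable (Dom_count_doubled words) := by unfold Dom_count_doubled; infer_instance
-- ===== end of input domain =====

-- B replaces A's test of every adjacent index pair by a run-length scan that adds
-- each maximal run's contribution (length - 1) in one dictionary update (alternative decomposition).

-- ===== PORT A =====
def count_doubled (words : List String) : List (String × Int) :=
  (words.foldl
    (fun d w =>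
      (PySem.List.pyRange 0 (PySem.Str.len w - 1) 1).foldl
        (fun d i =>
          if PySem.List.pyGetD w.toList i ' ' == PySem.List.pyGetD w.toList (i + 1) ' ' then
            ((d.setdefault (String.ofList [PySem.List.pyGetD w.toList i ' ']) 0).modify
              (String.ofList [PySem.List.pyGetD w.toList i ' ']) 0 (· + 1))
          else d)
        d)
    PySem.Dict.empty).items

-- ===== PORT B =====
-- leading-run length: how many chars at the front of the list equal c (B's inner while loop)
def pvRunLen (c : Char) : List Char → Nat
  | [] => 0
  | x :: xs => if x == c then pvRunLen c xs + 1 else 0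

-- B's outer while loop over the remaining character list
def pvRunLoop (d : PySem.Dict String Int) : List Char → PySem.Dict String Int
  | [] => d
  | c :: rest =>
    let r := pvRunLen c rest
    pvRunLoop
      (if 0 < r then d.insert (String.ofList [c]) (d.getD (String.ofList [c]) 0 + (r : Int)) else d)
      (rest.drop r)
termination_by cs => cs.length
decreasing_by simp

def count_doubled_alt (words : List String) : List (String × Int) :=
  (words.foldl (fun d w => pvRunLoop d w.toList) PySem.Dict.empty).items

-- ===== PRECONDITION & SPEC =====
def Spec_count_doubled (words : List String) (out : List (String × Int)) : Prop := out = count_doubled_alt words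
instance (words : List String) (out : List (String × Int)) : Decidable (Spec_count_doubled words out) := by unfold Spec_count_doubled; infer_instance

-- ===== CLAIM (what is proved, stated in full; the proofs are below) =====
def Claim_equal_count_doubled : Prop := ∀ (words : List String), Dom_count_doubled words → Spec_count_doubled words (count_doubled words)

-- ===== LEMMAS AND PROOFS =====

-- the 1-char string Python uses as the dict key
def pvKey (c : Char) : String := String.ofList [c]

-- one execution of A's then-branch
def pvBump (d : PySem.Dict String Int) (c : Char) : PySem.Dict String Int :=
  (d.setdefault (pvKey c) 0).modify (pvKey c) 0 (· + 1)

-- A's inner-loop body, as a named function of the word's character list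
def pvBody (cs : List Char) (d : PySem.Dict String Int) (i : Int) : PySem.Dict String Int :=
  if PySem.List.pyGetD cs i ' ' == PySem.List.pyGetD cs (i + 1) ' ' then
    pvBump d (PySem.List.pyGetD cs i ' ')
  else d

-- adjacent pairs of a character list
def pvAdj : List Char → List (Char × Char)
  | [] => []
  | [_] => []
  | x :: y :: t => (x, y) :: pvAdj (y :: t)

def pvStep (d : PySem.Dict String Int) (p : Char × Char) : PySem.Dict String Int :=
  if p.1 == p.2 then pvBump d p.1 else d

def pvBumpN : PySem.Dict String Int → Char → Nat → PySem.Dict String Int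
  | d, _, 0 => d
  | d, c, r + 1 => pvBumpN (pvBump d c) c r

lemma pvBump_eq (d : PySem.Dict String Int) (c : Char) :
    pvBump d c = d.insert (pvKey c) (d.getD (pvKey c) 0 + 1) := by
  by_cases h : d.contains (pvKey c) = true
  · unfold pvBump
    rw [PySem.Dict.setdefault_of_contains _ _ h]
    rfl
  · have h' : d.contains (pvKey c) = false := by simpa using h
    unfold pvBump
    rw [PySem.Dict.setdefault_of_not_contains _ _ h']
    show (d.insert (pvKey c) 0).insert (pvKey c) ((d.insert (pvKey c) 0).getD (pvKey c) 0 + 1) = _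
    rw [PySem.Dict.getD_insert_self, PySem.Dict.insert_insert_self,
        PySem.Dict.getD_of_not_contains _ _ h']

lemma pvBumpN_eq (r : Nat) : ∀ (d : PySem.Dict String Int) (c : Char),
    pvBumpN d c (r + 1) = d.insert (pvKey c) (d.getD (pvKey c) 0 + ((r : Int) + 1)) := by
  induction r with
  | zero =>
    intro d c
    show pvBump d c = _
    rw [pvBump_eq]
    norm_num
  | succ r ih =>
    intro d c
    show pvBumpN (pvBump d c) c (r + 1) = _
    rw [ih, pvBump_eq, PySem.Dict.getD_insert_self, PySem.Dict.insert_insert_self]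
    congr 1
    omega

-- shifting A's index loop one step into the list
lemma pvShift (x : Char) (cs : List Char) (b : Nat) (d : PySem.Dict String Int) :
    (PySem.List.pyRange 1 ((b : Int) + 1) 1).foldl (pvBody (x :: cs)) d
      = (PySem.List.pyRange 0 (b : Int) 1).foldl (pvBody cs) d := by
  rw [PySem.List.pyRange_one, PySem.List.pyRange_one]
  have hb : ((b : Int) + 1 - 1).toNat = b := by omega
  have hb' : ((b : Int) - 0).toNat = b := by omega
  rw [hb, hb', List.foldl_map, List.foldl_map]
  apply PySem.List.foldl_congr_mem
  intro acc k _
  have h1 : (1 : Int) + (k : Int) = ((k + 1 : Nat) : Int) := by push_cast; ring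
  have h2 : (1 : Int) + (k : Int) + 1 = ((k + 2 : Nat) : Int) := by push_cast; ring
  have h3 : (0 : Int) + (k : Int) = ((k : Nat) : Int) := by ring
  have h4 : ((k : Nat) : Int) + 1 = ((k + 1 : Nat) : Int) := by push_cast; ring
  unfold pvBody
  rw [h2, h1, h3, h4]
  simp only [PySem.List.pyGetD_natCast, List.getD_cons_succ]

-- A's index loop computes the fold of pvStep over the adjacent pairs
lemma pvA_eq_adj : ∀ (cs : List Char) (d : PySem.Dict String Int),
    (PySem.List.pyRange 0 ((cs.length : Int) - 1) 1).foldl (pvBody cs) d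
      = (pvAdj cs).foldl pvStep d := by
  intro cs
  induction cs using pvAdj.induct with
  | case1 =>
    intro d
    rw [PySem.List.pyRange_one_eq_nil (by simp)]
    rfl
  | case2 x =>
    intro d
    rw [PySem.List.pyRange_one_eq_nil (by simp)]
    rfl
  | case3 x y t ih =>
    intro d
    have hb : (((x :: y :: t).length : Int) - 1) = ((t.length : Int) + 1) := by
      simp only [List.length_cons]
      push_cast
      ring
    rw [hb, PySem.List.pyRange_one_cons (by positivity)]
    simp only [List.foldl_cons]
    have hbd : pvBody (x :: y :: t) d 0 = pvStep d (x, y) := by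
      unfold pvBody pvStep
      norm_num [PySem.List.pyGetD_zero_cons]
      rw [show (1 : Int) = ((1 : Nat) : Int) by norm_num, PySem.List.pyGetD_natCast]
      rfl
    rw [hbd, show (0:Int) + 1 = 1 by norm_num, pvShift x (y :: t) t.length]
    have hb2 : ((t.length : Int)) = (((y :: t).length : Int) - 1) := by simp
    rw [hb2, ih]
    simp [pvAdj]

-- a maximal run of r + 1 equal characters contributes r bumps
lemma pvAdj_run : ∀ (r : Nat) (c : Char) (t : List Char) (d : PySem.Dict String Int),
    (t.head? = some c → False) →
    (pvAdj (c :: (List.replicate r c ++ t))).foldl pvStep d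
      = (pvAdj t).foldl pvStep (pvBumpN d c r) := by
  intro r
  induction r with
  | zero =>
    intro c t d ht
    cases t with
    | nil => simp [pvAdj, pvBumpN]
    | cons z t' =>
      have hz : (c == z) = false := by
        by_contra h
        exact ht (by simp at h ⊢; exact h.symm)
      simp only [List.replicate, List.nil_append, pvAdj, List.foldl_cons, pvStep, hz,
        Bool.false_eq_true, if_false, pvBumpN]
  | succ r ih =>
    intro c t d ht
    have hrep : List.replicate (r + 1) c ++ t = c :: (List.replicate r c ++ t) := by
      simp [List.replicate_succ]
    rw [hrep]
    show ((c, c) :: pvAdj (c :: (List.replicate r c ++ t))).foldl pvStep d = _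
    simp only [List.foldl_cons, pvStep, BEq.rfl, if_true]
    exact ih c t (pvBump d c) ht

-- the leading run decomposition B's scan computes
lemma pvRunLen_decomp (c : Char) : ∀ (rest : List Char),
    rest = List.replicate (pvRunLen c rest) c ++ rest.drop (pvRunLen c rest)
      ∧ ((rest.drop (pvRunLen c rest)).head? = some c → False) := by
  intro rest
  induction rest with
  | nil => simp [pvRunLen]
  | cons x xs ih =>
    by_cases h : (x == c) = true
    · have hx : x = c := by simpa using h
      constructor
      · show x :: xs = List.replicate (pvRunLen c (x :: xs)) c ++ (x :: xs).drop (pvRunLen c (x :: xs))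
        rw [show pvRunLen c (x :: xs) = pvRunLen c xs + 1 by simp [pvRunLen, h]]
        rw [List.replicate_succ, List.drop_succ_cons]
        rw [hx]
        exact congrArg (c :: ·) ih.1
      · rw [show pvRunLen c (x :: xs) = pvRunLen c xs + 1 by simp [pvRunLen, h]]
        rw [List.drop_succ_cons]
        exact ih.2
    · have h' : (x == c) = false := by simpa using h
      rw [show pvRunLen c (x :: xs) = 0 by simp [pvRunLen, h']]
      constructor
      · simp
      · intro hh
        simp at hh
        rw [hh] at h'
        simp at h'

-- B's run loop also computes the fold of pvStep over the adjacent pairs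
lemma pvB_eq_adj_aux : ∀ (n : Nat) (cs : List Char), cs.length ≤ n →
    ∀ (d : PySem.Dict String Int), pvRunLoop d cs = (pvAdj cs).foldl pvStep d := by
  intro n
  induction n with
  | zero =>
    intro cs h d
    have hnil : cs = [] := by cases cs with
      | nil => rfl
      | cons a b => simp at h
    subst hnil
    rw [pvRunLoop.eq_def]
    rfl
  | succ n ih =>
    intro cs h d
    cases cs with
    | nil =>
        rw [pvRunLoop.eq_def]
        rfl
    | cons c rest =>
      obtain ⟨hdec, hhd⟩ := pvRunLen_decomp c rest
      have hlen : (rest.drop (pvRunLen c rest)).length ≤ n := by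
        simp at h ⊢; omega
      rw [show pvRunLoop d (c :: rest) = pvRunLoop
            (if 0 < pvRunLen c rest then
              d.insert (String.ofList [c]) (d.getD (String.ofList [c]) 0 + (pvRunLen c rest : Int))
            else d)
            (rest.drop (pvRunLen c rest)) from by rw [pvRunLoop.eq_def]]
      rw [ih _ hlen]
      have key : (pvAdj (c :: rest)).foldl pvStep d
          = (pvAdj (rest.drop (pvRunLen c rest))).foldl pvStep (pvBumpN d c (pvRunLen c rest)) := by
        conv_lhs => rw [show rest = List.replicate (pvRunLen c rest) c ++ rest.drop (pvRunLen c rest) from hdec]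
        exact pvAdj_run _ c _ d hhd
      rw [key]
      congr 1
      cases hr : pvRunLen c rest with
      | zero => simp [pvBumpN]
      | succ m =>
        rw [pvBumpN_eq]
        rw [if_pos (Nat.succ_pos m)]
        simp only [pvKey]
        congr 1

lemma pvB_eq_adj (d : PySem.Dict String Int) (cs : List Char) :
    pvRunLoop d cs = (pvAdj cs).foldl pvStep d :=
  pvB_eq_adj_aux cs.length cs le_rfl d

-- ===== VERDICT (by name: the statement is the Claim_ definition above) =====
theorem count_doubled_spec : Claim_equal_count_doubled := by
  intro words _
  unfold Spec_count_doubled count_doubled count_doubled_alt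
  congr 1
  apply PySem.List.foldl_congr_mem
  intro d w _
  rw [pvB_eq_adj]
  have h := pvA_eq_adj w.toList d
  rw [show PySem.Str.len w = ((w.toList.length : Int)) by simp [PySem.Str.len_eq]]
  exact h
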